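-- pv_equiv track=rewrite | github.com/AsteriskAmpersand/Leviathon | codeAnalysis.py | reprRegisters
-- ===== SOURCE A (Python) =====
-- def reprRegisters(usage):
--     registers = {}
--     for reg,getset in sorted(usage):
--         if reg in registers:
--             registers[reg] = "%s: (Get,Set)"%reg
--         else:
--             registers[reg] = "%s: (%s)"%(reg,getset)
--     return ''.join(["\t%s\n"%string for string in sorted(registers.values())])
-- ===== SOURCE B (Python) =====
-- def reprRegisters(usage):
--     keys = [reg for reg, _ in usage]
--     lines = []
--     for i, (reg, getset) in enumerate(usage):
--         if keys.index(reg) == i: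
--             if keys.count(reg) > 1:
--                 lines.append("%s: (Get,Set)" % reg)
--             else:
--                 lines.append("%s: (%s)" % (reg, getset))
--     return ''.join("\t%s\n" % s for s in sorted(lines))
-- ===== Notes on version B (the rewrite author's own statement) =====
-- stated objective: alternative
-- what changed: B drops both the pre-sort of the input and the dict: it scans usage once in original order, keeps only each register's first occurrence (keys.index(reg) == i) and decides the line format from keys.count(reg), sorting only the final lines.
import Mathlib
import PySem

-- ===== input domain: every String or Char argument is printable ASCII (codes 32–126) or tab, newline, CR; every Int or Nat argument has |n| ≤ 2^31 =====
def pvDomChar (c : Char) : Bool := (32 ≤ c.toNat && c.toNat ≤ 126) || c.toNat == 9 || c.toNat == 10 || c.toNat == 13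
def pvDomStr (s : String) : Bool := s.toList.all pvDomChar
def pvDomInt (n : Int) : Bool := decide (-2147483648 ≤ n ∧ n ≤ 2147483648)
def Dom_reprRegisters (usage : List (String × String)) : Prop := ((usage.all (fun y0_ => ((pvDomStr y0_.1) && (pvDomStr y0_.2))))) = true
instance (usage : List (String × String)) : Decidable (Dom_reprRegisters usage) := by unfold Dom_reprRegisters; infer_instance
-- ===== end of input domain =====

-- B drops A's pre-sort of the input and A's dict: one scan of usage in original order keeps only
-- each register's first occurrence and decides the line format from the register's key count;
-- only the final lines are sorted. Same return value (objective: alternative).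

-- ===== PORT A =====
def reprRegisters (usage : List (String × String)) : String :=
  let registers : PySem.Dict String String :=
    (PySem.List.sorted2 usage (·.1) (·.2)).foldl
      (fun d p =>
        if d.contains p.1 then d.insert p.1 (p.1 ++ ": (Get,Set)")
        else d.insert p.1 (p.1 ++ ": (" ++ p.2 ++ ")"))
      PySem.Dict.empty
  PySem.Str.join ""
    ((PySem.List.sorted registers.values (fun x => x) false).map (fun s => "\t" ++ s ++ "\n"))

-- ===== PORT B =====
def reprRegisters_alt (usage : List (String × String)) : String :=
  let keys : List String := usage.map (·.1)
  let lines : List String :=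
    (PySem.List.enumerate usage).foldl
      (fun acc ip =>
        if (PySem.List.index? keys ip.2.1).map (fun n => (n : Int)) = some ip.1 then
          acc ++ [if 1 < PySem.List.count keys ip.2.1 then ip.2.1 ++ ": (Get,Set)"
                  else ip.2.1 ++ ": (" ++ ip.2.2 ++ ")"]
        else acc)
      []
  PySem.Str.join ""
    ((PySem.List.sorted lines (fun x => x) false).map (fun s => "\t" ++ s ++ "\n"))

-- ===== PRECONDITION & SPEC =====
def Spec_reprRegisters (usage : List (String × String)) (out : String) : Prop := out = reprRegisters_alt usage
instance (usage : List (String × String)) (out : String) : Decidable (Spec_reprRegisters usage out) := by unfold Spec_reprRegisters; infer_instance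

-- ===== CLAIM (what is proved, stated in full; the proofs are below) =====
def Claim_equal_reprRegisters : Prop := ∀ (usage : List (String × String)), Dom_reprRegisters usage → Spec_reprRegisters usage (reprRegisters usage)

-- ===== LEMMAS AND PROOFS =====

-- the getset values recorded for register `reg` in list `l`, in order
def grp (l : List (String × String)) (reg : String) : List String :=
  (l.filter (fun p => p.1 == reg)).map (·.2)

-- the line both programs emit for register `reg` of usage list `l`
def lineOf (l : List (String × String)) (reg : String) : String :=
  if 1 < (grp l reg).length then reg ++ ": (Get,Set)"
  else reg ++ ": (" ++ PySem.List.pyGetD (grp l reg) 0 "" ++ ")"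

-- ========== A side (dict built over the sorted input) ==========

-- A's loop body, with the branch pulled inside the insert
lemma stepA_eq (d : PySem.Dict String String) (p : String × String) :
    (if d.contains p.1 then d.insert p.1 (p.1 ++ ": (Get,Set)")
     else d.insert p.1 (p.1 ++ ": (" ++ p.2 ++ ")"))
    = d.insert p.1 (if d.contains p.1 then p.1 ++ ": (Get,Set)" else p.1 ++ ": (" ++ p.2 ++ ")") := by
  split <;> rfl

-- invariant of A's loop: the final entry at `reg` is determined by `grp l reg`
lemma foldlA_getD (l : List (String × String)) (d : PySem.Dict String String) (reg : String) :
    (l.foldl (fun d p =>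
        if d.contains p.1 then d.insert p.1 (p.1 ++ ": (Get,Set)")
        else d.insert p.1 (p.1 ++ ": (" ++ p.2 ++ ")")) d).getD reg ""
    = if (grp l reg).length = 0 then d.getD reg ""
      else if d.contains reg || 1 < (grp l reg).length then reg ++ ": (Get,Set)"
      else reg ++ ": (" ++ PySem.List.pyGetD (grp l reg) 0 "" ++ ")" := by
  induction l generalizing d with
  | nil => simp [grp]
  | cons p l ih =>
    rw [List.foldl_cons, stepA_eq, ih]
    by_cases hpr : p.1 = reg
    · subst hpr
      have hg : grp (p :: l) p.1 = p.2 :: grp l p.1 := by simp [grp]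
      rw [hg, PySem.Dict.getD_insert_self, PySem.Dict.contains_insert_self, List.length_cons]
      by_cases hrest : (grp l p.1).length = 0
      · have h0 : grp l p.1 = [] := List.length_eq_zero_iff.mp hrest
        simp [h0, PySem.List.pyGetD]
      · have h1 : 1 < (grp l p.1).length + 1 := by omega
        simp [hrest, h1]
    · have hg : grp (p :: l) reg = grp l reg := by simp [grp, hpr]
      rw [hg, PySem.Dict.getD_insert, PySem.Dict.contains_insert]
      simp [Ne.symm hpr]

-- ========== B side (first-occurrence scan over the unsorted input) ==========

-- the registers whose first occurrence lies in the scanned suffix, in order of first occurrence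
def newRegs (seen : List String) : List (String × String) → List String
  | [] => []
  | p :: t => if p.1 ∈ seen then newRegs seen t else p.1 :: newRegs (p.1 :: seen) t

lemma newRegs_congr (s1 s2 : List String) (l : List (String × String))
    (h : ∀ r, r ∈ s1 ↔ r ∈ s2) : newRegs s1 l = newRegs s2 l := by
  induction l generalizing s1 s2 with
  | nil => rfl
  | cons p t ih =>
    by_cases hp : p.1 ∈ s1
    · simp [newRegs, hp, (h p.1).mp hp, ih s1 s2 h]
    · have hp2 : p.1 ∉ s2 := fun hx => hp ((h p.1).mpr hx)
      simp only [newRegs, if_neg hp, if_neg hp2]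
      exact congrArg _ (ih _ _ (by intro r; simp [h r]))

lemma mem_newRegs (seen : List String) (l : List (String × String)) (r : String) :
    r ∈ newRegs seen l ↔ r ∈ l.map (·.1) ∧ r ∉ seen := by
  induction l generalizing seen with
  | nil => simp [newRegs]
  | cons p t ih =>
    by_cases hp : p.1 ∈ seen
    · simp only [newRegs, if_pos hp, ih, List.map_cons, List.mem_cons]
      constructor
      · rintro ⟨h1, h2⟩; exact ⟨Or.inr h1, h2⟩
      · rintro ⟨h1 | h1, h2⟩
        · exact absurd (h1 ▸ hp) h2
        · exact ⟨h1, h2⟩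
    · simp only [newRegs, if_neg hp, List.mem_cons, ih, List.map_cons, List.mem_cons]
      constructor
      · rintro (rfl | ⟨h1, h2⟩)
        · exact ⟨Or.inl rfl, hp⟩
        · exact ⟨Or.inr h1, fun hx => h2 (by simp [hx])⟩
      · rintro ⟨rfl | h1, h2⟩
        · exact Or.inl rfl
        · by_cases hr : r = p.1
          · exact Or.inl hr
          · exact Or.inr ⟨h1, by simp [hr, h2]⟩

lemma nodup_newRegs (seen : List String) (l : List (String × String)) :
    (newRegs seen l).Nodup := by
  induction l generalizing seen with
  | nil => simp [newRegs]
  | cons p t ih =>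
    by_cases hp : p.1 ∈ seen
    · simpa [newRegs, hp] using ih seen
    · simp only [newRegs, if_neg hp]
      refine List.Nodup.cons ?_ (ih (p.1 :: seen))
      intro hmem
      exact ((mem_newRegs _ _ _).mp hmem).2 (List.mem_cons_self)

-- count of a register among the keys is the length of its group
lemma grp_length_eq_count (l : List (String × String)) (reg : String) :
    (grp l reg).length = (l.map (·.1)).count reg := by
  induction l with
  | nil => simp [grp]
  | cons p t ih =>
    by_cases hp : p.1 = reg
    · simp [grp, hp] at *; omega
    · simp [grp, hp] at *; exact ih

-- B's fold over the enumerated suffix emits exactly the lines of the new registers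
lemma foldB_eq (usage : List (String × String)) :
    ∀ (suf pre : List (String × String)) (acc : List String), usage = pre ++ suf →
    (PySem.List.enumerate suf (pre.length : Int)).foldl
      (fun acc ip =>
        if (PySem.List.index? (usage.map (·.1)) ip.2.1).map (fun n => (n : Int)) = some ip.1 then
          acc ++ [if 1 < PySem.List.count (usage.map (·.1)) ip.2.1 then ip.2.1 ++ ": (Get,Set)"
                  else ip.2.1 ++ ": (" ++ ip.2.2 ++ ")"]
        else acc) acc
    = acc ++ (newRegs (pre.map (·.1)) suf).map (lineOf usage) := by
  intro suf
  induction suf with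
  | nil => intro pre acc _; simp [PySem.List.enumerate_nil, newRegs]
  | cons p t ih =>
    intro pre acc husage
    rw [PySem.List.enumerate_cons, List.foldl_cons]
    have hkeys : usage.map (·.1) = pre.map (·.1) ++ p.1 :: t.map (·.1) := by
      simp [husage]
    by_cases hp : p.1 ∈ pre.map (·.1)
    · -- not the first occurrence: index? points strictly before pre.length
      have hidx : ∃ k, PySem.List.index? (usage.map (·.1)) p.1 = some k ∧ k < pre.length := by
        rw [hkeys, PySem.List.index?_append_of_mem _ hp]
        rcases (PySem.List.index?_isSome_iff (pre.map (·.1)) p.1).mpr hp with h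
        rcases Option.isSome_iff_exists.mp h with ⟨k, hk⟩
        refine ⟨k, hk, ?_⟩
        rcases (PySem.List.index?_eq_some_iff _ _ _).mp hk with ⟨pr, sf, heq, hlen, _⟩
        have := congrArg List.length heq
        simp at this; omega
      rcases hidx with ⟨k, hk, hklt⟩
      have hcond : ¬ ((PySem.List.index? (usage.map (·.1)) p.1).map (fun n => (n : Int))
          = some ((pre.length : Nat) : Int)) := by
        rw [hk]; simp; omega
      rw [if_neg hcond]
      have hrec := ih (pre ++ [p]) acc (by simp [husage])
      simp only [List.length_append, List.length_cons, List.length_nil] at hrec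
      have hcast : ((pre.length : Int) + 1) = ((pre.length + 1 : Nat) : Int) := by push_cast; ring
      rw [hcast, hrec]
      have hstep : newRegs ((pre ++ [p]).map (·.1)) t = newRegs (pre.map (·.1)) (p :: t) := by
        simp only [newRegs, if_pos hp]
        refine newRegs_congr _ _ _ ?_
        intro r
        rw [List.map_append, List.mem_append, List.map_cons, List.map_nil, List.mem_singleton]
        constructor
        · rintro (h | rfl)
          · exact h
          · exact hp
        · exact Or.inl
      rw [hstep]
    · -- first occurrence: index? is exactly pre.length, and the emitted line is lineOf
      have hidx : PySem.List.index? (usage.map (·.1)) p.1 = some pre.length := by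
        rw [hkeys]
        exact (PySem.List.index?_eq_some_iff _ _ _).mpr ⟨pre.map (·.1), t.map (·.1), rfl, by simp, hp⟩
      rw [if_pos (by rw [hidx]; rfl)]
      have hline :
          (if 1 < PySem.List.count (usage.map (·.1)) p.1 then p.1 ++ ": (Get,Set)"
           else p.1 ++ ": (" ++ p.2 ++ ")") = lineOf usage p.1 := by
        have hcnt : (grp usage p.1).length = (usage.map (·.1)).count p.1 := grp_length_eq_count _ _
        rw [PySem.List.count_eq]
        by_cases h1 : 1 < (usage.map (·.1)).count p.1
        · rw [if_pos h1, lineOf, if_pos (by omega)]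
        · rw [if_neg h1, lineOf, if_neg (by omega)]
          -- the group is exactly [p.2]
          have hgrp : grp usage p.1 = [p.2] := by
            have hpre : (pre.filter (fun q => q.1 == p.1)) = [] := by
              rw [List.filter_eq_nil_iff]
              intro q hq hq1
              exact hp (List.mem_map.mpr ⟨q, hq, by simpa using hq1⟩)
            have hcnt1 : (grp usage p.1).length ≥ 1 := by
              have : p ∈ usage.filter (fun q => q.1 == p.1) := by
                refine List.mem_filter.mpr ⟨by simp [husage], by simp⟩
              have : (usage.filter (fun q => q.1 == p.1)).length ≥ 1 :=
                List.length_pos_of_mem this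
              simpa [grp] using this
            have hle : (grp usage p.1).length ≤ 1 := by omega
            have ht : (t.filter (fun q => q.1 == p.1)) = [] := by
              by_contra hne
              rcases List.exists_mem_of_ne_nil _ hne with ⟨q, hq⟩
              have h2 : (grp usage p.1).length ≥ 2 := by
                have : usage.filter (fun q => q.1 == p.1)
                    = pre.filter (fun q => q.1 == p.1) ++ p :: t.filter (fun q => q.1 == p.1) := by
                  simp [husage, List.filter_append]
                have hlen := congrArg List.length this
                have hq1 : (t.filter (fun q => q.1 == p.1)).length ≥ 1 :=
                  List.length_pos_of_mem hq
                simp [grp, hpre] at *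
                omega
              omega
            simp [grp, husage, List.filter_append, hpre, ht]
          simp [hgrp, PySem.List.pyGetD]
      rw [hline]
      have hrec := ih (pre ++ [p]) (acc ++ [lineOf usage p.1]) (by simp [husage])
      simp only [List.length_append, List.length_cons, List.length_nil] at hrec
      have hcast : ((pre.length : Int) + 1) = ((pre.length + 1 : Nat) : Int) := by push_cast; ring
      rw [hcast, hrec]
      have hregs : newRegs ((pre ++ [p]).map (·.1)) t = newRegs (p.1 :: pre.map (·.1)) t := by
        refine newRegs_congr _ _ _ ?_
        intro r; simp; tauto
      rw [hregs]
      simp [newRegs, hp]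

-- ========== combining the two sides ==========

-- the sorted line lists of the two programs coincide
lemma sorted_lines_eq (usage : List (String × String)) :
    PySem.List.sorted
      ((PySem.List.sorted2 usage (·.1) (·.2)).foldl
        (fun d p =>
          if d.contains p.1 then d.insert p.1 (p.1 ++ ": (Get,Set)")
          else d.insert p.1 (p.1 ++ ": (" ++ p.2 ++ ")")) PySem.Dict.empty).values
      (fun x => x) false
  = PySem.List.sorted
      ((PySem.List.enumerate usage).foldl
        (fun acc ip =>
          if (PySem.List.index? (usage.map (·.1)) ip.2.1).map (fun n => (n : Int)) = some ip.1 then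
            acc ++ [if 1 < PySem.List.count (usage.map (·.1)) ip.2.1 then ip.2.1 ++ ": (Get,Set)"
                    else ip.2.1 ++ ": (" ++ ip.2.2 ++ ")"]
          else acc) [])
      (fun x => x) false := by
  simp only [stepA_eq]
  set su := PySem.List.sorted2 usage (·.1) (·.2) with hsu
  have hpermsu : su.Perm usage := PySem.List.sorted2_perm usage _ _ false
  -- A side: values = map (lineOf usage) over the distinct keys of su
  have hkeysA : ((su.foldl (fun d p => d.insert p.1
      (if d.contains p.1 then p.1 ++ ": (Get,Set)" else p.1 ++ ": (" ++ p.2 ++ ")"))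
      PySem.Dict.empty)).keys = PySem.Set.ofList (su.map (·.1)) := by
    rw [PySem.Dict.keys_foldl_insert_key su (·.1)
      (fun d p => if d.contains p.1 then p.1 ++ ": (Get,Set)" else p.1 ++ ": (" ++ p.2 ++ ")")]
    rfl
  have hnodA := PySem.Dict.nodup_keys_foldl_insert_key su (·.1)
      (fun d p => if d.contains p.1 then p.1 ++ ": (Get,Set)" else p.1 ++ ": (" ++ p.2 ++ ")")
      PySem.Dict.empty (by simp [PySem.Dict.keys_empty])
  rw [PySem.Dict.values_eq_map_keys _ hnodA "", hkeysA]
  have hAval : ∀ k ∈ PySem.Set.ofList (su.map (·.1)),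
      ((su.foldl (fun d p => d.insert p.1
        (if d.contains p.1 then p.1 ++ ": (Get,Set)" else p.1 ++ ": (" ++ p.2 ++ ")"))
        PySem.Dict.empty)).getD k "" = lineOf usage k := by
    intro k hk
    rw [PySem.Set.mem_ofList] at hk
    have hperm_g : (grp su k).Perm (grp usage k) := (hpermsu.filter _).map _
    have hne : grp su k ≠ [] := by
      rcases List.mem_map.mp hk with ⟨p, hp, hpk⟩
      have : p ∈ su.filter (fun q => q.1 == k) := by
        refine List.mem_filter.mpr ⟨hp, by simp [hpk]⟩
      simp only [grp, ne_eq, List.map_eq_nil_iff, List.filter_eq_nil_iff]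
      intro h; exact absurd (List.mem_filter.mp this).2 (by simpa using h p hp)
    have hlen0 : (grp su k).length ≠ 0 := by simpa [List.length_eq_zero_iff] using hne
    simp only [← stepA_eq]
    rw [foldlA_getD, if_neg hlen0]
    simp only [PySem.Dict.contains_empty, Bool.false_or, lineOf, hperm_g.length_eq]
    by_cases h1 : 1 < (grp usage k).length
    · simp [h1]
    · have hone : (grp usage k).length = 1 := by
        have := hperm_g.length_eq; omega
      rcases List.length_eq_one_iff.mp hone with ⟨a, ha⟩
      have hsuk : grp su k = [a] := by
        rw [ha] at hperm_g; exact List.perm_singleton.mp hperm_g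
      simp [hsuk, ha]
  rw [List.map_congr_left hAval]
  -- B side: the fold emits map (lineOf usage) over the first-occurrence keys of usage
  have hB := foldB_eq usage usage [] [] (by simp)
  simp only [List.length_nil, Nat.cast_zero, List.nil_append, List.map_nil] at hB
  rw [hB]
  -- the two key lists are permutations, so the sorted line lists agree
  have hkp : (PySem.Set.ofList (su.map (·.1))).Perm (newRegs (([] : List (String × String)).map (·.1)) usage) := by
    refine (List.perm_ext_iff_of_nodup (PySem.Set.nodup_ofList _) (nodup_newRegs _ _)).mpr ?_
    intro a
    rw [PySem.Set.mem_ofList, mem_newRegs, (hpermsu.map (·.1)).mem_iff]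
    simp
  exact PySem.List.sorted_eq_sorted_of_perm _ _ (fun x => x) (fun _ _ h => h)
    (hkp.map (lineOf usage))

-- ===== VERDICT (by name: the statement is the Claim_ definition above) =====
theorem reprRegisters_spec : Claim_equal_reprRegisters := by
  intro usage _
  exact congrArg (fun L => PySem.Str.join "" (L.map (fun s => "\t" ++ s ++ "\n")))
    (sorted_lines_eq usage)
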